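-- pv_equiv track=rewrite | github.com/rtpchan/aoc2022 | code/aoc15b.py | gen_boundary
-- ===== SOURCE A (Python) =====
-- from typing import Tuple, List
--
-- def gen_boundary(sensor, distance) -> List[Tuple[int,int]]:
--     dist = distance + 1
--     path  = []
--     # north
--     north = (sensor[0], sensor[1]+dist)
--     for i in range(dist):
--         n = (north[0]+1, north[1]-1)
--         path.append(n)
--         north = n
--     # east
--     east = north
--     for i in range(dist):
--         n = (east[0]-1, east[1]-1)
--         path.append(n)
--         east = n
--     # south
--     south = east
--     for i in range(dist):
--         n = (south[0]-1, south[1]+1)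
--         path.append(n)
--         south = n
--     # west
--     west = south
--     for i in range(dist):
--         n = (west[0]+1, west[1]+1)
--         path.append(n)
--         west = n
--     return path
-- ===== SOURCE B (Python) =====
-- from typing import Tuple, List
--
-- def gen_boundary(sensor, distance) -> List[Tuple[int,int]]:
--     sx, sy = sensor
--     d = distance + 1
--     return ([(sx + 1 + i, sy + d - 1 - i) for i in range(d)]
--           + [(sx + d - 1 - i, sy - 1 - i) for i in range(d)]
--           + [(sx - 1 - i, sy - d + 1 + i) for i in range(d)]
--           + [(sx - d + 1 + i, sy + 1 + i) for i in range(d)])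
-- ===== Notes on version B (the rewrite author's own statement) =====
-- stated objective: simpler
-- what changed: B replaces A's four stateful loops that thread a running point through mutation with four closed-form index interpolations (one comprehension per diamond edge), concatenated.
import Mathlib
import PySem

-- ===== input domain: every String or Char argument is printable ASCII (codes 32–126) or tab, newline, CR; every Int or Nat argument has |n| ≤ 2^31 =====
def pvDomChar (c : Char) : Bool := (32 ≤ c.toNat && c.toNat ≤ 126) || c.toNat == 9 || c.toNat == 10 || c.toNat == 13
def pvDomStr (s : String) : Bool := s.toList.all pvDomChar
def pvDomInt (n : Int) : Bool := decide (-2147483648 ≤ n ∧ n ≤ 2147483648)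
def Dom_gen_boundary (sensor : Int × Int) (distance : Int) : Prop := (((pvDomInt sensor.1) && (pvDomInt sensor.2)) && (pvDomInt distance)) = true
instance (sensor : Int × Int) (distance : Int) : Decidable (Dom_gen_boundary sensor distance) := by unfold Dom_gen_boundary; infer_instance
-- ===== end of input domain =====

-- B replaces A's four point-threading loops with closed-form per-edge comprehensions; objective: simpler.

-- ===== PORT A =====
-- one 'for i in range(dist)' loop of A, threading (current point, path) and stepping by (dx,dy)
def pvEdgeLoop (dx dy : Int) (st : (Int × Int) × List (Int × Int)) (dist : Int) :
    (Int × Int) × List (Int × Int) :=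
  (PySem.List.pyRange 0 dist 1).foldl
    (fun s _ =>
      let n := (s.1.1 + dx, s.1.2 + dy)
      (n, s.2 ++ [n])) st

def gen_boundary (sensor : Int × Int) (distance : Int) : List (Int × Int) :=
  let dist := distance + 1
  let path : List (Int × Int) := []
  let north : Int × Int := (sensor.1, sensor.2 + dist)
  let s1 := pvEdgeLoop 1 (-1) (north, path) dist
  let s2 := pvEdgeLoop (-1) (-1) (s1.1, s1.2) dist
  let s3 := pvEdgeLoop (-1) 1 (s2.1, s2.2) dist
  let s4 := pvEdgeLoop 1 1 (s3.1, s3.2) dist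
  s4.2

-- ===== PORT B =====
def gen_boundary_alt (sensor : Int × Int) (distance : Int) : List (Int × Int) :=
  let sx := sensor.1
  let sy := sensor.2
  let d := distance + 1
  ((PySem.List.pyRange 0 d 1).map (fun i => (sx + 1 + i, sy + d - 1 - i)))
    ++ ((PySem.List.pyRange 0 d 1).map (fun i => (sx + d - 1 - i, sy - 1 - i)))
    ++ ((PySem.List.pyRange 0 d 1).map (fun i => (sx - 1 - i, sy - d + 1 + i)))
    ++ ((PySem.List.pyRange 0 d 1).map (fun i => (sx - d + 1 + i, sy + 1 + i)))

-- ===== PRECONDITION & SPEC =====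
def Spec_gen_boundary (sensor : Int × Int) (distance : Int) (out : List (Int × Int)) : Prop := out = gen_boundary_alt sensor distance
instance (sensor : Int × Int) (distance : Int) (out : List (Int × Int)) : Decidable (Spec_gen_boundary sensor distance out) := by unfold Spec_gen_boundary; infer_instance

-- ===== CLAIM (what is proved, stated in full; the proofs are below) =====
def Claim_equal_gen_boundary : Prop := ∀ (sensor : Int × Int) (distance : Int), Dom_gen_boundary sensor distance → Spec_gen_boundary sensor distance (gen_boundary sensor distance)

-- ===== LEMMAS AND PROOFS =====

-- closed form of one of A's edge loops, over a Nat-length range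
theorem pvEdgeLoop_closed (dx dy : Int) (x y : Int) (acc : List (Int × Int)) (n : Nat) :
    (List.range n).foldl
      (fun (s : (Int × Int) × List (Int × Int)) _ =>
        let m := (s.1.1 + dx, s.1.2 + dy)
        (m, s.2 ++ [m])) ((x, y), acc)
    = ((x + dx * n, y + dy * n),
       acc ++ (List.range n).map (fun (i : Nat) => (x + dx * ((i : Int) + 1), y + dy * ((i : Int) + 1)))) := by
  induction n generalizing acc with
  | zero => simp
  | succ k ih =>
      rw [List.range_succ, List.foldl_append, List.map_append]
      simp only [List.foldl_cons, List.foldl_nil, ih, List.map_cons, List.map_nil,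
        List.append_assoc]
      refine Prod.ext (Prod.ext ?_ ?_) ?_
      · push_cast; ring
      · push_cast; ring
      · have hp : (x + dx * (k : Int) + dx, y + dy * (k : Int) + dy)
            = (x + dx * ((k : Int) + 1), y + dy * ((k : Int) + 1)) := by
          simp only [Prod.mk.injEq]; constructor <;> ring
        rw [hp]

theorem pvEdgeLoop_eq (dx dy : Int) (x y : Int) (acc : List (Int × Int)) (dist : Int) :
    pvEdgeLoop dx dy ((x, y), acc) dist
    = ((x + dx * max dist 0, y + dy * max dist 0),
       acc ++ (List.range dist.toNat).map (fun (i : Nat) => (x + dx * ((i : Int) + 1), y + dy * ((i : Int) + 1)))) := by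
  unfold pvEdgeLoop
  rw [PySem.List.pyRange_one]
  simp only [Int.sub_zero]
  rw [List.foldl_map]
  have := pvEdgeLoop_closed dx dy x y acc (dist - 0).toNat
  simp only [Int.sub_zero] at this
  rw [this]
  have h : ((dist).toNat : Int) = max dist 0 := by omega
  rw [h]

theorem map_range_toNat (d : Int) (hd : 0 < d) (f : Nat → Int × Int) (g : Int → Int × Int)
    (h : ∀ i : Nat, (i : Int) < d → f i = g i) :
    (List.range d.toNat).map f = (PySem.List.pyRange 0 d 1).map g := by
  rw [PySem.List.pyRange_one, List.map_map]
  simp only [Int.sub_zero]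
  apply List.map_congr_left
  intro i hi
  simp only [Function.comp, zero_add]
  exact h i (by simp at hi; omega)

-- ===== VERDICT (by name: the statement is the Claim_ definition above) =====
theorem gen_boundary_spec : Claim_equal_gen_boundary := by
  intro sensor distance _
  unfold Spec_gen_boundary gen_boundary gen_boundary_alt
  obtain ⟨sx, sy⟩ := sensor
  set d := distance + 1
  simp only
  by_cases hpos : 0 < d
  · have hmax : max d 0 = d := by omega
    rw [pvEdgeLoop_eq, pvEdgeLoop_eq, pvEdgeLoop_eq, pvEdgeLoop_eq]
    simp only [hmax, List.nil_append, List.append_assoc]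
    congr 1
    · refine map_range_toNat d hpos _ _ ?_
      intro i hi; dsimp only; simp only [Prod.mk.injEq]; constructor <;> ring
    congr 1
    · refine map_range_toNat d hpos _ _ ?_
      intro i hi; dsimp only; simp only [Prod.mk.injEq]; constructor <;> ring
    congr 1
    · refine map_range_toNat d hpos _ _ ?_
      intro i hi; dsimp only; simp only [Prod.mk.injEq]; constructor <;> ring
    · refine map_range_toNat d hpos _ _ ?_
      intro i hi; dsimp only; simp only [Prod.mk.injEq]; constructor <;> ring
  · have hnil : PySem.List.pyRange 0 d 1 = [] := PySem.List.pyRange_one_eq_nil (by omega)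
    rw [pvEdgeLoop_eq, pvEdgeLoop_eq, pvEdgeLoop_eq, pvEdgeLoop_eq]
    have : d.toNat = 0 := by omega
    simp [hnil, this]
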